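-- pv_equiv track=rewrite | github.com/NiFangBaAGe/DATTT | ttt_demo.py | split_files
-- ===== SOURCE A (Python) =====
-- def split_files(files):
--
--     videos = {}
--     for filename in files:
--         cat = filename.split('/')[-1].split('_')[0]
--         # if cat == 'breakdance':
--         #     continue
--         if cat not in videos.keys():
--             videos[cat] = []
--         videos[cat].append(filename)
--
--     return videos
-- ===== SOURCE B (Python) =====
-- def split_files(files):
--     keys = list(dict.fromkeys(f.split('/')[-1].split('_')[0] for f in files))
--     return {c: [f for f in files if f.split('/')[-1].split('_')[0] == c] for c in keys}
-- ===== Notes on version B (the rewrite author's own statement) =====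
-- stated objective: idiomatic
-- what changed: Replaces the single pass that conditionally creates and mutates dict entries with an ordered-dedup key collection (dict.fromkeys) followed by a per-key filtering dict comprehension; the conditional-append state machine disappears.
import Mathlib
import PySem

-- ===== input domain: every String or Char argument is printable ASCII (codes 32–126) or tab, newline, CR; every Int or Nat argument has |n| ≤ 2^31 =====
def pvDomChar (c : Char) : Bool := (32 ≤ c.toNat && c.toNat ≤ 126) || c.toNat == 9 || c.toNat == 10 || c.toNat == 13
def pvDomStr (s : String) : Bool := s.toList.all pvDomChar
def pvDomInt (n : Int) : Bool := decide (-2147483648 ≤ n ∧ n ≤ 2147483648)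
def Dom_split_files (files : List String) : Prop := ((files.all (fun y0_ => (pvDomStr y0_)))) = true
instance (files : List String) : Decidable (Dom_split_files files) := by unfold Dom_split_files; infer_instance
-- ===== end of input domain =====

-- B replaces A's single conditional-append pass with an ordered dedup of category keys
-- followed by a per-key filtering comprehension (objective: idiomatic).

-- shared helper: the category key  filename.split('/')[-1].split('_')[0]
-- (both sources compute this identical expression; split? never returns none here since the
--  separators are nonempty, and the indices never raise since split returns a nonempty list)
def pvCat (s : String) : String :=
  PySem.List.pyGetD
    ((PySem.Str.split? (PySem.List.pyGetD ((PySem.Str.split? s "/").getD []) (-1) "") "_").getD [])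
    0 ""

-- ===== PORT A =====
-- one loop iteration of A's for-loop
def pvStep (videos : PySem.Dict String (List String)) (filename : String) :
    PySem.Dict String (List String) :=
  let cat := pvCat filename
  let videos := if videos.contains cat then videos else videos.insert cat []
  videos.modify cat [] (· ++ [filename])

def split_files (files : List String) : List (String × List String) :=
  (files.foldl pvStep PySem.Dict.empty).items

-- ===== PORT B =====
-- list(dict.fromkeys(...)) is PySem.List.dedup; the dict comprehension over these distinct
-- keys yields, in key order, exactly this association list
def split_files_alt (files : List String) : List (String × List String) :=
  (PySem.List.dedup (files.map pvCat)).map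
    (fun c => (c, files.filter (fun f => pvCat f == c)))

-- ===== PRECONDITION & SPEC =====
def Spec_split_files (files : List String) (out : List (String × List String)) : Prop := out = split_files_alt files
instance (files : List String) (out : List (String × List String)) : Decidable (Spec_split_files files out) := by unfold Spec_split_files; infer_instance

-- ===== CLAIM (what is proved, stated in full; the proofs are below) =====
def Claim_equal_split_files : Prop := ∀ (files : List String), Dom_split_files files → Spec_split_files files (split_files files)

-- ===== LEMMAS AND PROOFS =====

theorem contains_keys_eq (d : PySem.Dict String (List String)) (c : String) :
    PySem.Set.contains d.keys c = d.contains c := by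
  rw [PySem.Set.contains, PySem.Dict.contains_eq_decide_mem_keys]
  simp

theorem pvStep_keys (d : PySem.Dict String (List String)) (f : String) :
    (pvStep d f).keys = PySem.Set.add d.keys (pvCat f) := by
  by_cases h : d.contains (pvCat f) = true
  · simp only [pvStep, PySem.Set.add, h, if_true, contains_keys_eq,
      PySem.Dict.keys_modify, PySem.Dict.keys_insert_of_contains _ _ h]
  · simp only [pvStep, PySem.Set.add, h, if_false, contains_keys_eq, Bool.false_eq_true,
      PySem.Dict.keys_modify,
      PySem.Dict.keys_insert_of_contains _ _ (PySem.Dict.contains_insert_self d _ _),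
      PySem.Dict.keys_insert_of_not_contains _ _ (by simpa using h)]

theorem pvStep_getD (d : PySem.Dict String (List String)) (f c : String) :
    (pvStep d f).getD c [] = d.getD c [] ++ (if pvCat f == c then [f] else []) := by
  by_cases h : d.contains (pvCat f) = true
  · simp only [pvStep, h, if_true]
    rw [PySem.Dict.getD_modify]
    by_cases hc : c = pvCat f
    · subst hc; simp
    · have hc' : ¬ pvCat f = c := fun e => hc e.symm
      simp [hc, hc']
  · have h' : d.contains (pvCat f) = false := by simpa using h
    simp only [pvStep, h', Bool.false_eq_true, if_false]
    rw [PySem.Dict.getD_modify]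
    by_cases hc : c = pvCat f
    · subst hc
      simp [PySem.Dict.getD_of_not_contains d ([] : List String) h']
    · have hc' : ¬ pvCat f = c := fun e => hc e.symm
      simp [hc, hc', PySem.Dict.getD_insert]

theorem foldl_pvStep_getD (l : List String) (d : PySem.Dict String (List String)) (c : String) :
    (l.foldl pvStep d).getD c [] = d.getD c [] ++ l.filter (fun f => pvCat f == c) := by
  induction l generalizing d with
  | nil => simp
  | cons x xs ih =>
    simp only [List.foldl_cons, ih, pvStep_getD, List.filter_cons]
    by_cases h : pvCat x == c
    · simp [h]
    · simp [h]

theorem foldl_pvStep_keys (l : List String) (d : PySem.Dict String (List String)) :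
    (l.foldl pvStep d).keys = PySem.Set.update d.keys (l.map pvCat) := by
  induction l generalizing d with
  | nil => rfl
  | cons x xs ih =>
    simp only [List.foldl_cons, List.map_cons, ih, pvStep_keys, PySem.Set.update]

theorem foldl_pvStep_nodup (l : List String) (d : PySem.Dict String (List String))
    (h : d.keys.Nodup) : (l.foldl pvStep d).keys.Nodup := by
  induction l generalizing d with
  | nil => exact h
  | cons x xs ih =>
    rw [List.foldl_cons]
    refine ih _ ?_
    rw [pvStep_keys, PySem.Set.add]
    split
    · exact h
    · next hc =>
      have hm : pvCat x ∉ d.keys := by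
        simpa [PySem.Set.contains, List.contains_iff_mem] using hc
      rw [List.nodup_append]
      refine ⟨h, List.nodup_singleton _, ?_⟩
      intro a ha b hb
      rw [List.mem_singleton] at hb
      subst hb
      exact fun e => hm (e ▸ ha)

-- ===== VERDICT (by name: the statement is the Claim_ definition above) =====
theorem split_files_spec : Claim_equal_split_files := by
  intro files _
  unfold Spec_split_files split_files split_files_alt
  rw [PySem.Dict.items_eq_map_keys _ (foldl_pvStep_nodup _ _ PySem.Dict.nodup_keys_empty) [],
    foldl_pvStep_keys]
  refine List.map_congr_left (fun c _ => ?_)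
  rw [foldl_pvStep_getD]
  simp [PySem.Dict.getD_empty]
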